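-- pv_equiv track=rewrite | github.com/outtamercy/SkyGen | src/config.py | _parse_ini_content
-- ===== SOURCE A (Python) =====
-- from typing import Dict, Any, Optional, TypeVar, Type
--
-- def _parse_ini_content(content: str) -> Dict[str, Dict[str, str]]:
--     config: Dict[str, Dict[str, str]] = {}
--     current_section = None
--     for line in content.splitlines():
--         line = line.strip()
--         if not line or line.startswith('#'):
--             continue
--         if line.startswith('[') and line.endswith(']'):
--             current_section = line[1:-1]
--             config[current_section] = {}
--         elif current_section and '=' in line:
--             key, value = line.split('=', 1)
--             config[current_section][key.strip()] = value.strip()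
--     return config
-- ===== SOURCE B (Python) =====
-- def _parse_ini_content(content):
--     # Phase 1: group meaningful lines into (section_name, body_lines) in encounter order.
--     groups = []
--     name, body = None, []
--     for raw in content.splitlines():
--         line = raw.strip()
--         if not line or line.startswith('#'):
--             continue
--         if line.startswith('[') and line.endswith(']'):
--             if name is not None:
--                 groups.append((name, body))
--             name, body = line[1:-1], []
--         elif name:
--             body.append(line)
--     if name is not None:
--         groups.append((name, body))
--     # Phase 2: build the config; a later duplicate section overwrites (resets) the earlier one.
--     config = {}
--     for name, body in groups:
--         config[name] = dict(
--             (k.strip(), v.strip())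
--             for k, v in (l.split('=', 1) for l in body if '=' in l)
--         )
--     return config
-- ===== Notes on version B (the rewrite author's own statement) =====
-- stated objective: alternative
-- what changed: A fills nested dicts in one interleaved line loop with mutable current-section state; B first partitions the stripped lines into an ordered list of (section, body_lines) groups and then builds each section dict per group, letting later duplicate groups overwrite earlier ones.
import Mathlib
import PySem

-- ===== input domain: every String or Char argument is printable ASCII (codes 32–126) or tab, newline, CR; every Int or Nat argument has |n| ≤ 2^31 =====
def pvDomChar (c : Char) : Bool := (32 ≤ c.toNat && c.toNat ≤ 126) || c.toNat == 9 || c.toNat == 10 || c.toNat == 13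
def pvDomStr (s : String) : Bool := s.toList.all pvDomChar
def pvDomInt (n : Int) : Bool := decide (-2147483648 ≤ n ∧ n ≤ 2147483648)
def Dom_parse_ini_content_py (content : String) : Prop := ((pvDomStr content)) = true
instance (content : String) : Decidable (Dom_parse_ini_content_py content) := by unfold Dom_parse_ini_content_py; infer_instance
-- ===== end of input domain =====

-- B regroups the INI text in two phases (partition lines into (section, body) groups, then build each
-- section dict per group) instead of A's single interleaved loop; objective: alternative decomposition.


-- ===== PORT A =====
-- 'key, value = line.split("=", 1)' (guarded by '=' in line, so two pieces exist)
def pvSplitKV (line : String) : String × String :=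
  match PySem.Str.splitMax? line "=" 1 with
  | some (k :: v :: _) => (k, v)
  | _ => (line, "")   -- unreachable under the '=' guard

-- A's loop, state = (config, current_section); 'config[cur][k] = v' is Dict.modify (cur is always
-- present in config when set, so modify's default is never read — exact).
def pvA_loop : List String → PySem.Dict String (PySem.Dict String String) → Option String →
    PySem.Dict String (PySem.Dict String String)
  | [], config, _ => config
  | raw :: rest, config, cur =>
    let line := PySem.Str.strip raw
    if line == "" || PySem.Str.startswith line "#" then
      pvA_loop rest config cur
    else if PySem.Str.startswith line "[" && PySem.Str.endswith line "]" then
      let sec := PySem.Str.slice line (some 1) (some (-1))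
      pvA_loop rest (config.insert sec PySem.Dict.empty) (some sec)
    else
      match cur with
      | some sec =>
        if !(sec == "") && PySem.Str.isIn "=" line then
          let kv := pvSplitKV line
          pvA_loop rest
            (config.modify sec PySem.Dict.empty
              (fun d => d.insert (PySem.Str.strip kv.1) (PySem.Str.strip kv.2))) cur
        else pvA_loop rest config cur
      | none => pvA_loop rest config cur

def parse_ini_content_py (content : String) : List (String × List (String × String)) :=
  ((pvA_loop (PySem.Str.splitlines content) PySem.Dict.empty none).items).map
    (fun p => (p.1, p.2.items))

-- ===== PORT B =====
-- Phase 1 of Source B: fold the lines into groups (accumulator) plus the pending open group.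
def pvB_flush : Option (String × List String) → List (String × List String)
  | some g => [g]
  | none => []

def pvB_group : List String → List (String × List String) → Option (String × List String) →
    List (String × List String)
  | [], gs, p => gs ++ pvB_flush p
  | raw :: rest, gs, p =>
    let line := PySem.Str.strip raw
    if line == "" || PySem.Str.startswith line "#" then
      pvB_group rest gs p
    else if PySem.Str.startswith line "[" && PySem.Str.endswith line "]" then
      pvB_group rest (gs ++ pvB_flush p) (some (PySem.Str.slice line (some 1) (some (-1)), []))
    else
      match p with
      | some (n, b) => if !(n == "") then pvB_group rest gs (some (n, b ++ [line])) else pvB_group rest gs p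
      | none => pvB_group rest gs p

-- Phase 2 of Source B: 'dict((k.strip(), v.strip()) for k, v in (l.split("=", 1) for l in body if "=" in l))'
def pvB_section (body : List String) : PySem.Dict String String :=
  PySem.Dict.ofList ((body.filter (fun l => PySem.Str.isIn "=" l)).map
    (fun l => (PySem.Str.strip (pvSplitKV l).1, PySem.Str.strip (pvSplitKV l).2)))

def parse_ini_content_py_alt (content : String) : List (String × List (String × String)) :=
  let groups := pvB_group (PySem.Str.splitlines content) [] none
  let config := groups.foldl (fun c g => c.insert g.1 (pvB_section g.2)) PySem.Dict.empty
  config.items.map (fun p => (p.1, p.2.items))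

-- ===== PRECONDITION & SPEC =====
def Spec_parse_ini_content_py (content : String) (out : List (String × List (String × String))) : Prop := out = parse_ini_content_py_alt content
instance (content : String) (out : List (String × List (String × String))) : Decidable (Spec_parse_ini_content_py content out) := by unfold Spec_parse_ini_content_py; infer_instance

-- ===== CLAIM (what is proved, stated in full; the proofs are below) =====
def Claim_equal_parse_ini_content_py : Prop := ∀ (content : String), Dom_parse_ini_content_py content → Spec_parse_ini_content_py content (parse_ini_content_py content)

-- ===== LEMMAS AND PROOFS =====

-- emitting form of the grouping fold (proof helper)
def pvB_emit : List String → Option (String × List String) → List (String × List String)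
  | [], p => pvB_flush p
  | raw :: rest, p =>
    let line := PySem.Str.strip raw
    if line == "" || PySem.Str.startswith line "#" then
      pvB_emit rest p
    else if PySem.Str.startswith line "[" && PySem.Str.endswith line "]" then
      pvB_flush p ++ pvB_emit rest (some (PySem.Str.slice line (some 1) (some (-1)), []))
    else
      match p with
      | some (n, b) => if !(n == "") then pvB_emit rest (some (n, b ++ [line])) else pvB_emit rest p
      | none => pvB_emit rest p

lemma pvB_group_eq_emit (lines : List String) (gs : List (String × List String))
    (p : Option (String × List String)) : pvB_group lines gs p = gs ++ pvB_emit lines p := by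
  induction lines generalizing gs p with
  | nil => rfl
  | cons raw rest ih =>
    simp only [pvB_group, pvB_emit]
    split_ifs
    · exact ih gs p
    · rw [ih, List.append_assoc]
    · cases p with
      | none => exact ih gs none
      | some g =>
        obtain ⟨n, b⟩ := g
        by_cases hn : (!(n == "")) = true <;> simp only [hn, if_true, if_false, Bool.false_eq_true] <;>
          exact ih gs _

def pvIns (c : PySem.Dict String (PySem.Dict String String)) (g : String × List String) :
    PySem.Dict String (PySem.Dict String String) := c.insert g.1 (pvB_section g.2)

def pvPush (c : PySem.Dict String (PySem.Dict String String)) :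
    Option (String × List String) → PySem.Dict String (PySem.Dict String String)
  | some g => pvIns c g
  | none => c

lemma pvB_section_append (b : List String) (line : String)
    (h : PySem.Str.isIn "=" line = true) :
    pvB_section (b ++ [line]) = (pvB_section b).insert
      (PySem.Str.strip (pvSplitKV line).1) (PySem.Str.strip (pvSplitKV line).2) := by
  simp only [PySem.Str.isIn_eq, show ("=".toList) = ['='] from rfl] at h
  simp [pvB_section, PySem.Dict.ofList, PySem.Dict.update, List.filter_append, h,
    List.foldl_append]

lemma pvB_section_append_skip (b : List String) (line : String)
    (h : PySem.Str.isIn "=" line = false) :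
    pvB_section (b ++ [line]) = pvB_section b := by
  simp only [PySem.Str.isIn_eq, show ("=".toList) = ['='] from rfl] at h
  simp [pvB_section, List.filter_append, h]

lemma pvModify_insert_self (c : PySem.Dict String (PySem.Dict String String)) (n : String)
    (d dflt : PySem.Dict String String) (f : PySem.Dict String String → PySem.Dict String String) :
    (c.insert n d).modify n dflt f = c.insert n (f d) := by
  simp [PySem.Dict.modify, PySem.Dict.getD_insert_self, PySem.Dict.insert_insert_self]

lemma pvFlush_foldl (c : PySem.Dict String (PySem.Dict String String))
    (p : Option (String × List String)) : (pvB_flush p).foldl pvIns c = pvPush c p := by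
  cases p <;> rfl

lemma pvMain (lines : List String) (config : PySem.Dict String (PySem.Dict String String))
    (p : Option (String × List String)) :
    pvA_loop lines (pvPush config p) (p.map Prod.fst) =
      (pvB_emit lines p).foldl pvIns config := by
  induction lines generalizing config p with
  | nil => cases p <;> rfl
  | cons raw rest ih =>
    simp only [pvA_loop, pvB_emit]
    split_ifs with h1 h2
    · exact ih config p
    · rw [List.foldl_append, pvFlush_foldl]
      exact ih (pvPush config p) (some (PySem.Str.slice (PySem.Str.strip raw) (some 1) (some (-1)), []))
    · cases p with
      | none => exact ih config none
      | some g =>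
        obtain ⟨n, b⟩ := g
        simp only [Option.map_some]
        by_cases hn : (!(n == "")) = true
        · by_cases he : PySem.Str.isIn "=" (PySem.Str.strip raw) = true
          · simp only [hn, he, Bool.and_true, if_true]
            have hmod : (pvPush config (some (n, b))).modify n PySem.Dict.empty
                (fun d => d.insert (PySem.Str.strip (pvSplitKV (PySem.Str.strip raw)).1)
                  (PySem.Str.strip (pvSplitKV (PySem.Str.strip raw)).2)) =
                pvPush config (some (n, b ++ [PySem.Str.strip raw])) := by
              show (config.insert n (pvB_section b)).modify n PySem.Dict.empty _ =
                config.insert n (pvB_section (b ++ [PySem.Str.strip raw]))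
              rw [pvModify_insert_self, pvB_section_append _ _ he]
            rw [hmod]
            exact ih config (some (n, b ++ [PySem.Str.strip raw]))
          · simp only [hn, eq_false_of_ne_true he, Bool.and_false, if_false,
              if_true, Bool.false_eq_true]
            have hsk : pvPush config (some (n, b)) =
                pvPush config (some (n, b ++ [PySem.Str.strip raw])) := by
              show config.insert n (pvB_section b) =
                config.insert n (pvB_section (b ++ [PySem.Str.strip raw]))
              rw [pvB_section_append_skip _ _ (eq_false_of_ne_true he)]
            rw [hsk]
            exact ih config (some (n, b ++ [PySem.Str.strip raw]))
        · simp only [hn, Bool.false_and, if_false, Bool.false_eq_true]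
          exact ih config (some (n, b))

-- ===== VERDICT (by name: the statement is the Claim_ definition above) =====
theorem parse_ini_content_py_spec : Claim_equal_parse_ini_content_py := by
  unfold Claim_equal_parse_ini_content_py
  intro content _
  unfold Spec_parse_ini_content_py parse_ini_content_py parse_ini_content_py_alt
  rw [pvB_group_eq_emit, List.nil_append]
  have := pvMain (PySem.Str.splitlines content) PySem.Dict.empty none
  simp only [pvPush, Option.map_none] at this
  rw [this]
  rfl
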